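-- pv_equiv track=rewrite | github.com/MyaGya/Python_Practice | Programers_backup/방의 개수.py | solution
-- ===== SOURCE A (Python) =====
-- from collections import defaultdict
--
-- def solution(arrows: list):
--     dy = [-1, -1, 0, 1, 1, 1, 0, -1]
--     dx = [0, 1, 1, 1, 0, -1, -1, -1]
--     visited = defaultdict(bool)  # (prev_x,prev_y,x,y) 와 (x,y,prev_x,prev_y) 로 저장
--     visited_point = defaultdict(bool)
--     x, y = 0, 0
--     ret = 0
--     visited_point[(0,0)] = True
--     for arrow in arrows:
--         for i in range(2): # 교차상태 고려를 위해 2칸씩 이동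
--             prev_x, prev_y = x, y
--             x += dx[arrow]
--             y += dy[arrow]
--             if visited[(x, y, prev_x, prev_y)]: # 한번 지나간 경로일 경우 아무것도 하지 않는다
--                 pass
--             else:                               # 지나가지 않은 경로일 경우
--                 visited[(x, y, prev_x, prev_y)] = True # 경로 추가
--                 visited[(prev_x, prev_y, x, y)] = True
--                 if visited_point[(x,y)]:        # 지나가지 않고 방문했었던 경로일 경우
--                     ret += 1
--                 else:                           # 지나가지 않고 방문하지도 않았던 경로일 경우
--                     visited_point[(x,y)] = True
--     return ret
-- ===== SOURCE B (Python) =====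
-- def solution(arrows: list):
--     dy = [-1, -1, 0, 1, 1, 1, 0, -1]
--     dx = [0, 1, 1, 1, 0, -1, -1, -1]
--     x, y = 0, 0
--     verts = {(0, 0)}
--     edges = set()
--     for arrow in arrows:
--         for _ in range(2):  # two half-steps so crossings land on grid points
--             prev = (x, y)
--             x += dx[arrow]
--             y += dy[arrow]
--             cur = (x, y)
--             verts.add(cur)
--             edges.add((prev, cur) if prev <= cur else (cur, prev))
--     # Euler's formula for the connected plane graph traced by the path: bounded faces = E - V + 1
--     return len(edges) - len(verts) + 1
-- ===== Notes on version B (the rewrite author's own statement) =====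
-- stated objective: alternative
-- what changed: B drops A's inline room counter and its two mutually-mirrored visited dicts: it accumulates a vertex set and a canonical undirected edge set during the same two-half-step walk and returns len(edges) - len(verts) + 1 by Euler's formula for bounded faces of a connected plane graph.
import Mathlib
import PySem

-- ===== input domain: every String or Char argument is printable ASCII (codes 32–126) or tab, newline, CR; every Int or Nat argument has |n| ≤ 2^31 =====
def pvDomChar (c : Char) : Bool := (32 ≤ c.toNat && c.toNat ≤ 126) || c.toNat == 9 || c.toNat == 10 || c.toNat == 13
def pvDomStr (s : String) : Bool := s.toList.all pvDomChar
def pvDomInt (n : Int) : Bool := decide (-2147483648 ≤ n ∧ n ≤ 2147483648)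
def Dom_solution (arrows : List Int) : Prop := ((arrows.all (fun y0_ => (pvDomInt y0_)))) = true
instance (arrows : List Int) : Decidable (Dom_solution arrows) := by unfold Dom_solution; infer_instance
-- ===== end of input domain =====

-- B replaces A's inline counter and mirrored visited dicts by vertex/edge sets and Euler's formula
-- (rooms = E - V + 1); equivalence is about the return value (neither side mutates its argument).

-- ===== PORT A =====
-- dy/dx tables; Python list indexing wraps for -8 ≤ i ≤ -1 and raises IndexError once the
-- index falls below -8 or above 7 (excluded by Pre_solution; .getD 0 is unreachable under Pre_).
def dyTab (i : Int) : Int := (PySem.List.pyGet? [-1, -1, 0, 1, 1, 1, 0, -1] i).getD 0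
def dxTab (i : Int) : Int := (PySem.List.pyGet? [0, 1, 1, 1, 0, -1, -1, -1] i).getD 0

structure AState where
  vis : PySem.Dict (Int × Int × Int × Int) Bool  -- visited, both orientations stored
  vp  : PySem.Dict (Int × Int) Bool              -- visited_point
  x   : Int
  y   : Int
  ret : Int
  deriving Repr

-- one iteration of A's inner 'for i in range(2)' body (defaultdict reads are getD … false:
-- the False entries a defaultdict read inserts never affect any later lookup or ret)
def stepA (arrow : Int) (s : AState) : AState :=
  let px := s.x
  let py := s.y
  let x := s.x + dxTab arrow
  let y := s.y + dyTab arrow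
  if s.vis.getD (x, y, px, py) false then
    { s with x := x, y := y }
  else
    let vis := (s.vis.insert (x, y, px, py) true).insert (px, py, x, y) true
    if s.vp.getD (x, y) false then
      { s with vis := vis, x := x, y := y, ret := s.ret + 1 }
    else
      { s with vis := vis, vp := s.vp.insert (x, y) true, x := x, y := y }

-- 'for i in range(2)' is the body twice (i unused)
def solution (arrows : List Int) : Int :=
  (arrows.foldl (fun s arrow => stepA arrow (stepA arrow s))
    { vis := PySem.Dict.empty, vp := PySem.Dict.empty.insert (0, 0) true,
      x := 0, y := 0, ret := 0 }).ret

-- ===== PORT B =====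
-- canonical undirected edge: '(prev, cur) if prev <= cur else (cur, prev)' (Python tuple ≤ is lex)
def canonEdge (p q : Int × Int) : (Int × Int) × (Int × Int) :=
  if p.1 < q.1 ∨ (p.1 = q.1 ∧ p.2 ≤ q.2) then (p, q) else (q, p)

structure BState where
  verts : PySem.Set (Int × Int)
  edges : PySem.Set ((Int × Int) × (Int × Int))
  x : Int
  y : Int
  deriving Repr

def stepB (arrow : Int) (s : BState) : BState :=
  let prev := (s.x, s.y)
  let x := s.x + dxTab arrow
  let y := s.y + dyTab arrow
  let cur := (x, y)
  { verts := PySem.Set.add s.verts cur,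
    edges := PySem.Set.add s.edges (canonEdge prev cur),
    x := x, y := y }

def solution_alt (arrows : List Int) : Int :=
  let s := arrows.foldl (fun s arrow => stepB arrow (stepB arrow s))
    { verts := PySem.Set.add PySem.Set.empty (0, 0), edges := PySem.Set.empty, x := 0, y := 0 }
  (s.edges.length : Int) - (s.verts.length : Int) + 1

-- ===== PRECONDITION & SPEC =====
-- Pre_ excludes exactly the inputs containing an arrow below -8 or above 7, on which A's dx[arrow] raises IndexError.
def Pre_solution (arrows : List Int) : Prop := ∀ a ∈ arrows, -8 ≤ a ∧ a < 8
instance (arrows : List Int) : Decidable (Pre_solution arrows) := by unfold Pre_solution; infer_instance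
def pvWitness_solution : List Int := ([0, 1, 2, 3, -4, 7])
def Spec_solution (arrows : List Int) (out : Int) : Prop := out = solution_alt arrows
instance (arrows : List Int) (out : Int) : Decidable (Spec_solution arrows out) := by unfold Spec_solution; infer_instance

-- ===== CLAIM (what is proved, stated in full; the proofs are below) =====
def Claim_equal_solution : Prop := ∀ (arrows : List Int), Dom_solution arrows → Pre_solution arrows → Spec_solution arrows (solution arrows)

-- ===== LEMMAS AND PROOFS =====

-- the coupling invariant between A's and B's loop states
def CoupleInv (sa : AState) (sb : BState) : Prop :=
  sa.x = sb.x ∧ sa.y = sb.y ∧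
  (∀ p : Int × Int, sa.vp.getD p false = true ↔ p ∈ sb.verts) ∧
  (∀ p q : Int × Int, sa.vis.getD (p.1, p.2, q.1, q.2) false = true ↔ canonEdge p q ∈ sb.edges) ∧
  sa.ret + (sb.verts.length : Int) = (sb.edges.length : Int) + 1 ∧
  (∀ e ∈ sb.edges, e.1 ∈ sb.verts ∧ e.2 ∈ sb.verts) ∧
  (sb.x, sb.y) ∈ sb.verts

theorem canonEdge_comm (p q : Int × Int) : canonEdge p q = canonEdge q p := by
  obtain ⟨a, b⟩ := p; obtain ⟨c, d⟩ := q
  simp only [canonEdge]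
  split_ifs with h1 h2 h2 <;> simp_all <;> omega

theorem canonEdge_cases (p q : Int × Int) : canonEdge p q = (p, q) ∨ canonEdge p q = (q, p) := by
  unfold canonEdge; split_ifs <;> simp

theorem canonEdge_inj {p q r s : Int × Int} (h : canonEdge p q = canonEdge r s) :
    (p = r ∧ q = s) ∨ (p = s ∧ q = r) := by
  unfold canonEdge at h
  split_ifs at h <;> simp_all [Prod.ext_iff]

theorem stepA_stepB_inv (arrow : Int) (sa : AState) (sb : BState) (h : CoupleInv sa sb) :
    CoupleInv (stepA arrow sa) (stepB arrow sb) := by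
  obtain ⟨hx, hy, hvp, hvis, hcnt, hend, hcur⟩ := h
  simp only [stepA, stepB]
  rw [hx, hy]
  set prev : Int × Int := (sb.x, sb.y) with hprev
  set cur : Int × Int := (sb.x + dxTab arrow, sb.y + dyTab arrow) with hcurdef
  by_cases hv : sa.vis.getD (cur.1, cur.2, prev.1, prev.2) false = true
  · -- edge already traversed: A does nothing, B's adds are no-ops
    have hmem : canonEdge prev cur ∈ sb.edges := by
      rw [canonEdge_comm]; exact (hvis cur prev).1 hv
    have hcv : cur ∈ sb.verts := by
      have hends := hend _ hmem
      rcases canonEdge_cases prev cur with hc | hc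
      · rw [hc] at hends; exact hends.2
      · rw [hc] at hends; exact hends.1
    rw [if_pos hv, PySem.Set.add_of_mem hcv, PySem.Set.add_of_mem hmem]
    exact ⟨rfl, rfl, hvp, hvis, hcnt, hend, hcv⟩
  · rw [if_neg hv]
    have hnmem : canonEdge prev cur ∉ sb.edges := fun hm => hv ((hvis cur prev).2 (canonEdge_comm cur prev ▸ hm))
    have hedges' : PySem.Set.add sb.edges (canonEdge prev cur) = sb.edges ++ [canonEdge prev cur] :=
      PySem.Set.add_of_not_mem hnmem
    -- the updated vis lookup, as a disjunction
    have hvis' : ∀ p q : Int × Int,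
        (((sa.vis.insert (cur.1, cur.2, prev.1, prev.2) true).insert (prev.1, prev.2, cur.1, cur.2) true).getD
          (p.1, p.2, q.1, q.2) false = true)
        ↔ canonEdge p q ∈ sb.edges ++ [canonEdge prev cur] := by
      intro p q
      rw [PySem.Dict.getD_insert, PySem.Dict.getD_insert]
      constructor
      · intro hg
        split_ifs at hg with h1 h2
        · -- key = (prev, cur)
          have : p = prev ∧ q = cur := by
            obtain ⟨a, b⟩ := p; obtain ⟨c, d⟩ := q
            simp [Prod.ext_iff] at h1 ⊢; tauto
          simp [this.1, this.2]
        · -- key = (cur, prev)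
          have : p = cur ∧ q = prev := by
            obtain ⟨a, b⟩ := p; obtain ⟨c, d⟩ := q
            simp [Prod.ext_iff] at h2 ⊢; tauto
          simp [this.1, this.2, canonEdge_comm cur prev]
        · exact List.mem_append_left _ ((hvis p q).1 hg)
      · intro hm
        rcases List.mem_append.1 hm with hm | hm
        · have := (hvis p q).2 hm
          split_ifs <;> simp_all
        · have hc : canonEdge p q = canonEdge prev cur := by simpa using hm
          rcases canonEdge_inj hc with ⟨h1, h2⟩ | ⟨h1, h2⟩
          · subst h1; subst h2; simp
          · subst h1; subst h2
            split_ifs with h1 h2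
            · rfl
            · rfl
            · exact absurd rfl h2
    by_cases hp : sa.vp.getD cur false = true
    · -- point seen before: a room closes
      have hcv : cur ∈ sb.verts := (hvp cur).1 hp
      rw [if_pos hp, PySem.Set.add_of_mem hcv, hedges']
      refine ⟨rfl, rfl, hvp, hvis', ?_, ?_, hcv⟩
      · simp only [List.length_append, List.length_cons, List.length_nil]
        push_cast; omega
      · intro e he
        rcases List.mem_append.1 he with he | he
        · exact hend e he
        · have : e = canonEdge prev cur := by simpa using he
          subst this
          rcases canonEdge_cases prev cur with hc | hc <;> rw [hc] <;> exact ⟨by assumption, by assumption⟩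
    · -- fresh point
      have hncv : cur ∉ sb.verts := fun hm => hp ((hvp cur).2 hm)
      have hverts' : PySem.Set.add sb.verts cur = sb.verts ++ [cur] := PySem.Set.add_of_not_mem hncv
      rw [if_neg hp, hverts', hedges']
      refine ⟨rfl, rfl, ?_, hvis', ?_, ?_,
        List.mem_append_right _ (List.mem_singleton.mpr rfl)⟩
      · intro p
        rw [PySem.Dict.getD_insert]
        split_ifs with h1
        · simp [h1]
        · rw [hvp p]; simp [h1]
      · simp only [List.length_append, List.length_cons, List.length_nil]
        push_cast; omega
      · intro e he
        rcases List.mem_append.1 he with he | he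
        · exact ⟨List.mem_append_left _ (hend e he).1, List.mem_append_left _ (hend e he).2⟩
        · have : e = canonEdge prev cur := by simpa using he
          subst this
          rcases canonEdge_cases prev cur with hc | hc <;> rw [hc]
          · exact ⟨List.mem_append_left _ hcur,
              List.mem_append_right _ (List.mem_singleton.mpr rfl)⟩
          · exact ⟨List.mem_append_right _ (List.mem_singleton.mpr rfl),
              List.mem_append_left _ hcur⟩

theorem foldl_inv (arrows : List Int) (sa : AState) (sb : BState) (h : CoupleInv sa sb) :
    CoupleInv (arrows.foldl (fun s arrow => stepA arrow (stepA arrow s)) sa)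
        (arrows.foldl (fun s arrow => stepB arrow (stepB arrow s)) sb) := by
  induction arrows generalizing sa sb with
  | nil => exact h
  | cons a rest ih =>
    exact ih _ _ (stepA_stepB_inv a _ _ (stepA_stepB_inv a _ _ h))

theorem inv_init :
    CoupleInv { vis := PySem.Dict.empty, vp := PySem.Dict.empty.insert (0, 0) true, x := 0, y := 0, ret := 0 }
        { verts := PySem.Set.add PySem.Set.empty (0, 0), edges := PySem.Set.empty, x := 0, y := 0 } := by
  refine ⟨rfl, rfl, ?_, ?_, by decide, ?_, by decide⟩
  · intro p
    rw [PySem.Dict.getD_insert]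
    split_ifs with h1 <;> simp [h1, PySem.Set.add, PySem.Set.empty, PySem.Dict.getD_empty]
  · intro p q
    simp [PySem.Dict.getD_empty, PySem.Set.empty]
  · intro e he
    simp [PySem.Set.empty] at he

-- ===== VERDICT (by name: the statement is the Claim_ definition above) =====
theorem solution_spec : Claim_equal_solution := by
  intro arrows _ _
  have h := foldl_inv arrows _ _ inv_init
  obtain ⟨-, -, -, -, hcnt, -, -⟩ := h
  show solution arrows = solution_alt arrows
  unfold solution solution_alt
  dsimp only
  omega
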